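-- pv_equiv track=rewrite | github.com/swu32/motif_learning | simulation/code/Learning.py | content_to_set
-- ===== SOURCE A (Python) =====
-- def content_to_set(ordered_content):
--     # return the variable instantiated content
--     content_set = set()
--     tshift = 0
--     for content in ordered_content:
--         maxdt = 0
--         for signal in content:
--             if signal[0] >= maxdt:
--                 maxdt = signal[0]
--
--             tshiftsignal = list(signal).copy()
--             tshiftsignal[0] = tshiftsignal[0] + tshift
--             content_set.add(tuple(tshiftsignal))
--
--         tshift = tshift + maxdt + 1
--     return content_set
-- ===== SOURCE B (Python) =====
-- def content_to_set(ordered_content):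
--     # Two-pass decomposition: precompute per-group floored maxima and an offset
--     # table, then emit all shifted signals in a separate pass.
--     maxdts = [max([0] + [s[0] for s in c]) for c in ordered_content]
--     offsets = []
--     off = 0
--     for m in maxdts:
--         offsets.append(off)
--         off = off + m + 1
--     result = set()
--     for c, o in zip(ordered_content, offsets):
--         for s in c:
--             result.add((s[0] + o,) + tuple(s[1:]))
--     return result
-- ===== Notes on version B (the rewrite author's own statement) =====
-- stated objective: alternative
-- what changed: Replaces A's single interleaved pass with a running tshift accumulator by a two-pass decomposition: first compute per-group floored maxima and a prefix-sum offset table, then emit all shifted signals in a separate pass.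
import Mathlib
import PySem

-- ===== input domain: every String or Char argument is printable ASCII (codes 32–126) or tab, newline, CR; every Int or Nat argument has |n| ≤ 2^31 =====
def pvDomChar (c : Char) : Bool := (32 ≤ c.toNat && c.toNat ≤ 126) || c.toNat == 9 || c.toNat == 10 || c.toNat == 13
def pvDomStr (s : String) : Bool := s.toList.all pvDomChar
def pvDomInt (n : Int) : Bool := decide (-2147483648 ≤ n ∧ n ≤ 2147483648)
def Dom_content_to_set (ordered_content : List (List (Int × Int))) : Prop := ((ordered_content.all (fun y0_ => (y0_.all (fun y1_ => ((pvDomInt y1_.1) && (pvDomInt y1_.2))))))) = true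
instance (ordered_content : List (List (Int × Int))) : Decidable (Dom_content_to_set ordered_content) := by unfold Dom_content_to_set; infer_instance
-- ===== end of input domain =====

-- B (alternative, same O(n) cost): replaces A's interleaved pass with a running tshift accumulator by two passes — per-group floored maxima and a prefix-sum offset table, then a separate emission pass.


-- ===== PORT A =====
-- Literal port of A: one pass carrying (content_set, tshift); the inner loop
-- carries (maxdt, content_set) and adds each shifted signal as it goes.
def content_to_set (ordered_content : List (List (Int × Int))) : List (Int × Int) :=
  (ordered_content.foldl
    (fun (st : PySem.Set (Int × Int) × Int) content =>
      let inner := content.foldl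
        (fun (st2 : Int × PySem.Set (Int × Int)) signal =>
          ((if signal.1 ≥ st2.1 then signal.1 else st2.1),
           PySem.Set.add st2.2 (signal.1 + st.2, signal.2)))
        (0, st.1)
      (inner.2, st.2 + inner.1 + 1))
    (PySem.Set.ofList [], 0)).1

-- ===== PORT B =====
-- B changes the decomposition: per-group floored maxima, then a prefix-sum
-- offset table, then a separate emission pass over (group, offset) pairs.
def content_to_set_alt (ordered_content : List (List (Int × Int))) : List (Int × Int) :=
  let maxdts := ordered_content.map (fun c => (c.map Prod.fst).foldl max 0)
  let offsets := (maxdts.foldl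
    (fun (st : List Int × Int) m => (st.1 ++ [st.2], st.2 + m + 1)) ([], 0)).1
  (ordered_content.zip offsets).foldl
    (fun (acc : PySem.Set (Int × Int)) co =>
      co.1.foldl (fun acc2 s => PySem.Set.add acc2 (s.1 + co.2, s.2)) acc)
    (PySem.Set.ofList [])

-- ===== PRECONDITION & SPEC =====
def Spec_content_to_set (ordered_content : List (List (Int × Int))) (out : List (Int × Int)) : Prop := out = content_to_set_alt ordered_content
instance (ordered_content : List (List (Int × Int))) (out : List (Int × Int)) : Decidable (Spec_content_to_set ordered_content out) := by unfold Spec_content_to_set; infer_instance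

-- ===== CLAIM (what is proved, stated in full; the proofs are below) =====
def Claim_equal_content_to_set : Prop := ∀ (ordered_content : List (List (Int × Int))), Dom_content_to_set ordered_content → Spec_content_to_set ordered_content (content_to_set ordered_content)

-- ===== LEMMAS AND PROOFS =====

-- the offset table B's foldl builds, in recursive form (starting offset t)
def pvOffs (t : Int) : List Int → List Int
  | [] => []
  | m :: ms => t :: pvOffs (t + m + 1) ms

theorem pvOffs_foldl (ms : List Int) (acc : List Int) (t : Int) :
    (ms.foldl (fun (st : List Int × Int) m => (st.1 ++ [st.2], st.2 + m + 1)) (acc, t)).1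
      = acc ++ pvOffs t ms := by
  induction ms generalizing acc t with
  | nil => simp [pvOffs]
  | cons m ms ih => simp [List.foldl, pvOffs, ih]

-- A's inner loop splits into two independent folds (max and set-building)
theorem pvInner_split (c : List (Int × Int)) (t : Int) (m : Int) (s : PySem.Set (Int × Int)) :
    c.foldl (fun (st2 : Int × PySem.Set (Int × Int)) signal =>
        ((if signal.1 ≥ st2.1 then signal.1 else st2.1),
         PySem.Set.add st2.2 (signal.1 + t, signal.2))) (m, s)
      = (c.foldl (fun mm signal => if signal.1 ≥ mm then signal.1 else mm) m,
         c.foldl (fun ss signal => PySem.Set.add ss (signal.1 + t, signal.2)) s) := by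
  induction c generalizing m s with
  | nil => rfl
  | cons x c ih => simp [List.foldl, ih]

-- A's running max equals B's foldl max over the first components
theorem pvMax_eq (c : List (Int × Int)) (m : Int) :
    c.foldl (fun mm signal => if signal.1 ≥ mm then signal.1 else mm) m
      = (c.map Prod.fst).foldl max m := by
  induction c generalizing m with
  | nil => rfl
  | cons x c ih =>
    have h : (if x.1 ≥ m then x.1 else m) = max m x.1 := by
      rw [max_def]
    simp only [List.foldl, List.map, h, ih]

-- main invariant: A's outer fold from (s, t) equals B's emission pass over
-- the groups zipped with the offset table starting at t
theorem pvMain (oc : List (List (Int × Int))) (s : PySem.Set (Int × Int)) (t : Int) :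
    (oc.foldl
      (fun (st : PySem.Set (Int × Int) × Int) content =>
        let inner := content.foldl
          (fun (st2 : Int × PySem.Set (Int × Int)) signal =>
            ((if signal.1 ≥ st2.1 then signal.1 else st2.1),
             PySem.Set.add st2.2 (signal.1 + st.2, signal.2)))
          (0, st.1)
        (inner.2, st.2 + inner.1 + 1)) (s, t)).1
      = (oc.zip (pvOffs t (oc.map (fun c => (c.map Prod.fst).foldl max 0)))).foldl
          (fun (acc : PySem.Set (Int × Int)) co =>
            co.1.foldl (fun acc2 sg => PySem.Set.add acc2 (sg.1 + co.2, sg.2)) acc) s := by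
  induction oc generalizing s t with
  | nil => rfl
  | cons c oc ih =>
    simp only [List.map, pvOffs, List.zip, List.zipWith, List.foldl]
    rw [pvInner_split, pvMax_eq]
    exact ih _ _


-- ===== VERDICT (by name: the statement is the Claim_ definition above) =====
theorem content_to_set_spec : Claim_equal_content_to_set := by
  intro oc _
  have h1 := pvMain oc (PySem.Set.ofList []) 0
  have h2 : ((oc.map (fun c => (c.map Prod.fst).foldl max 0)).foldl
      (fun (st : List Int × Int) m => (st.1 ++ [st.2], st.2 + m + 1)) ([], 0)).1
      = pvOffs 0 (oc.map (fun c => (c.map Prod.fst).foldl max 0)) := by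
    simpa using pvOffs_foldl (oc.map (fun c => (c.map Prod.fst).foldl max 0)) [] 0
  show content_to_set oc = content_to_set_alt oc
  calc content_to_set oc = _ := h1
    _ = content_to_set_alt oc := by rw [← h2]; rfl
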